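-- pv_equiv track=rewrite | github.com/stefanopepe-hub/ua-dashboard | enterprise_v2/backend/file_family_detector.py | detect_file_family
-- ===== SOURCE A (Python) =====
-- from typing import Iterable
--
-- def detect_file_family(column_names: Iterable[str]) -> str:
--     normalized = {str(c).strip().lower() for c in column_names if c}
--
--     # Saving / Orders
--     if (
--         {"saving", "impegnato", "fornitore"} & normalized
--         or {"imp iniziale", "imp negoziato", "alfa documento"} <= normalized
--         or {"ragione sociale fornitore", "data doc", "protoc commessa"} <= normalized
--     ):
--         return "saving_orders"
--
--     # Detailed orders / line items
--     if (
--         {"cod articolo", "descrizione articolo"} <= normalized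
--         or {"qta 1 doc", "prezzo netto 1", "importo riga"} & normalized
--         or {"cod documento", "nr doc", "ragione sociale anagrafica"} <= normalized
--     ):
--         return "detailed_orders"
--
--     # Resources / team
--     if (
--         {"risorsa", "pratiche gestite", "saving generato"} & normalized
--         or {"resource", "cases managed", "savings generated"} & normalized
--     ):
--         return "resources_team"
--
--     # Cycle times
--     if (
--         {"days purchasing", "days auto", "total days", "bottleneck"} <= normalized
--         or {"year month", "total days", "bottleneck"} <= normalized
--     ):
--         return "cycle_times"
--
--     # Non conformities
--     if (
--         {"non conformità", "data origine", "ragione sociale anagrafica"} <= normalized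
--         or {"tipo origine", "delta giorni (fattura origine)", "non conformità"} & normalized
--     ):
--         return "non_conformities"
--
--     # Suppliers master
--     if {"albo", "supplier", "vendor"} & normalized:
--         return "suppliers_master"
--
--     return "unknown"
-- ===== SOURCE B (Python) =====
-- _RULES = [
--     ("any", ("saving", "impegnato", "fornitore"), "saving_orders"),
--     ("all", ("imp iniziale", "imp negoziato", "alfa documento"), "saving_orders"),
--     ("all", ("ragione sociale fornitore", "data doc", "protoc commessa"), "saving_orders"),
--     ("all", ("cod articolo", "descrizione articolo"), "detailed_orders"),
--     ("any", ("qta 1 doc", "prezzo netto 1", "importo riga"), "detailed_orders"),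
--     ("all", ("cod documento", "nr doc", "ragione sociale anagrafica"), "detailed_orders"),
--     ("any", ("risorsa", "pratiche gestite", "saving generato"), "resources_team"),
--     ("any", ("resource", "cases managed", "savings generated"), "resources_team"),
--     ("all", ("days purchasing", "days auto", "total days", "bottleneck"), "cycle_times"),
--     ("all", ("year month", "total days", "bottleneck"), "cycle_times"),
--     ("all", ("non conformità", "data origine", "ragione sociale anagrafica"), "non_conformities"),
--     ("any", ("tipo origine", "delta giorni (fattura origine)", "non conformità"), "non_conformities"),
--     ("any", ("albo", "supplier", "vendor"), "suppliers_master"),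
-- ]
--
--
-- def detect_file_family(column_names):
--     # One streaming pass: count, per rule, how many of its distinct keywords occur.
--     hits = [0] * len(_RULES)
--     seen = set()
--     for c in column_names:
--         if not c:
--             continue
--         t = str(c).strip().lower()
--         if t not in seen:
--             seen.add(t)
--             hits = [h + (t in keys) for (_, keys, _), h in zip(_RULES, hits)]
--     # Threshold the counters: 'any' needs one hit, 'all' needs every keyword.
--     for (mode, keys, label), h in zip(_RULES, hits):
--         if h >= (1 if mode == "any" else len(keys)):
--             return label
--     return "unknown"
-- ===== Notes on version B (the rewrite author's own statement) =====
-- stated objective: alternative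
-- what changed: B never performs set intersection/subset tests: it makes a single streaming pass over the columns, incrementing a per-rule counter of distinct keywords seen, then returns the first rule whose counter reaches its threshold (1 for any-rules, the key count for all-rules).
import Mathlib
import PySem

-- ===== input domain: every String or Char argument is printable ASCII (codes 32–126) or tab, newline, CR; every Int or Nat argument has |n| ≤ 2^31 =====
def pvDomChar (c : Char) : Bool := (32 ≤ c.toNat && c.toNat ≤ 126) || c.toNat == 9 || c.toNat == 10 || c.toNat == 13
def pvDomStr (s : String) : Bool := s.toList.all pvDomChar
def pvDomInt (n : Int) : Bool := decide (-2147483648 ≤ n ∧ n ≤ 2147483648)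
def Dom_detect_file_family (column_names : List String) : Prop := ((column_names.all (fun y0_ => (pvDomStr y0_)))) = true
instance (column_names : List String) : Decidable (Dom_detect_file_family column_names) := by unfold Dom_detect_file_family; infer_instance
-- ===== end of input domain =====

-- B replaces A's build-a-set-then-set-intersection/subset tests by a single streaming pass over
-- the columns counting distinct keyword hits per rule, then thresholding the counters.

-- ===== PORT A =====
def detect_file_family (column_names : List String) : String :=
  let normalized : PySem.Set String :=
    PySem.Set.ofList ((column_names.filter (fun c => c ≠ "")).map
      (fun c => PySem.Str.lower (PySem.Str.strip c)))
  if ["saving", "impegnato", "fornitore"].any (fun k => PySem.Set.contains normalized k)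
     || ["imp iniziale", "imp negoziato", "alfa documento"].all (fun k => PySem.Set.contains normalized k)
     || ["ragione sociale fornitore", "data doc", "protoc commessa"].all (fun k => PySem.Set.contains normalized k)
  then "saving_orders"
  else if ["cod articolo", "descrizione articolo"].all (fun k => PySem.Set.contains normalized k)
     || ["qta 1 doc", "prezzo netto 1", "importo riga"].any (fun k => PySem.Set.contains normalized k)
     || ["cod documento", "nr doc", "ragione sociale anagrafica"].all (fun k => PySem.Set.contains normalized k)
  then "detailed_orders"
  else if ["risorsa", "pratiche gestite", "saving generato"].any (fun k => PySem.Set.contains normalized k)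
     || ["resource", "cases managed", "savings generated"].any (fun k => PySem.Set.contains normalized k)
  then "resources_team"
  else if ["days purchasing", "days auto", "total days", "bottleneck"].all (fun k => PySem.Set.contains normalized k)
     || ["year month", "total days", "bottleneck"].all (fun k => PySem.Set.contains normalized k)
  then "cycle_times"
  else if ["non conformità", "data origine", "ragione sociale anagrafica"].all (fun k => PySem.Set.contains normalized k)
     || ["tipo origine", "delta giorni (fattura origine)", "non conformità"].any (fun k => PySem.Set.contains normalized k)
  then "non_conformities"
  else if ["albo", "supplier", "vendor"].any (fun k => PySem.Set.contains normalized k)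
  then "suppliers_master"
  else "unknown"

-- ===== PORT B =====
-- Source B's _RULES table: (mode, keys, label)
def pvRules : List (String × List String × String) :=
  [ ("any", ["saving", "impegnato", "fornitore"], "saving_orders"),
    ("all", ["imp iniziale", "imp negoziato", "alfa documento"], "saving_orders"),
    ("all", ["ragione sociale fornitore", "data doc", "protoc commessa"], "saving_orders"),
    ("all", ["cod articolo", "descrizione articolo"], "detailed_orders"),
    ("any", ["qta 1 doc", "prezzo netto 1", "importo riga"], "detailed_orders"),
    ("all", ["cod documento", "nr doc", "ragione sociale anagrafica"], "detailed_orders"),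
    ("any", ["risorsa", "pratiche gestite", "saving generato"], "resources_team"),
    ("any", ["resource", "cases managed", "savings generated"], "resources_team"),
    ("all", ["days purchasing", "days auto", "total days", "bottleneck"], "cycle_times"),
    ("all", ["year month", "total days", "bottleneck"], "cycle_times"),
    ("all", ["non conformità", "data origine", "ragione sociale anagrafica"], "non_conformities"),
    ("any", ["tipo origine", "delta giorni (fattura origine)", "non conformità"], "non_conformities"),
    ("any", ["albo", "supplier", "vendor"], "suppliers_master") ]

def pvNorm (c : String) : String := PySem.Str.lower (PySem.Str.strip c)

-- body of Source B's `for c in column_names` loop; state = (hits, seen)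
def pvStep (st : List Nat × PySem.Set String) (c : String) : List Nat × PySem.Set String :=
  if c = "" then st
  else
    let t := pvNorm c
    if PySem.Set.contains st.2 t then st
    else ((pvRules.zip st.1).map (fun p => if p.1.2.1.contains t then p.2 + 1 else p.2),
          PySem.Set.add st.2 t)

-- Source B's second loop: first rule whose counter reaches its threshold
def pvPick : List ((String × List String × String) × Nat) → String
  | [] => "unknown"
  | (r, h) :: rest =>
      if (if r.1 == "any" then 1 else r.2.1.length) ≤ h then r.2.2 else pvPick rest

def detect_file_family_alt (column_names : List String) : String :=
  let st := column_names.foldl pvStep (pvRules.map (fun _ => 0), PySem.Set.ofList [])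
  pvPick (pvRules.zip st.1)

-- ===== PRECONDITION & SPEC =====
def Spec_detect_file_family (column_names : List String) (out : String) : Prop := out = detect_file_family_alt column_names
instance (column_names : List String) (out : String) : Decidable (Spec_detect_file_family column_names out) := by unfold Spec_detect_file_family; infer_instance

-- ===== CLAIM (what is proved, stated in full; the proofs are below) =====
def Claim_equal_detect_file_family : Prop := ∀ (column_names : List String), Dom_detect_file_family column_names → Spec_detect_file_family column_names (detect_file_family column_names)

-- ===== LEMMAS AND PROOFS =====

theorem zip_map_self (l : List (String × List String × String)) (f : String × List String × String → Nat)
    (t : String) :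
    (l.zip (l.map f)).map (fun p => if p.1.2.1.contains t = true then p.2 + 1 else p.2)
      = l.map (fun r => if r.2.1.contains t = true then f r + 1 else f r) := by
  induction l with
  | nil => rfl
  | cons a l ih => simp only [List.map_cons, List.zip_cons_cons, ih]

def pvHits (S : List String) : List Nat :=
  pvRules.map (fun r => S.countP (fun x => r.2.1.contains x))

def pvAddAll (S : PySem.Set String) (cs : List String) : PySem.Set String :=
  cs.foldl (fun S c => if c = "" then S else PySem.Set.add S (pvNorm c)) S

set_option maxHeartbeats 1000000 in
theorem fold_inv (cs : List String) : ∀ (S : PySem.Set String), S.Nodup →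
    cs.foldl pvStep (pvHits S, S) = (pvHits (pvAddAll S cs), pvAddAll S cs) := by
  induction cs with
  | nil => intro S _; rfl
  | cons c cs ih =>
    intro S hS
    by_cases hc : c = ""
    · simpa [List.foldl, pvStep, pvAddAll, hc] using ih S hS
    · by_cases hm : pvNorm c ∈ S
      · have hadd : PySem.Set.add S (pvNorm c) = S := PySem.Set.add_of_mem hm
        have hstep : pvStep (pvHits S, S) c = (pvHits S, S) := by
          simp [pvStep, hc, hm]
        rw [List.foldl_cons, hstep]
        have : pvAddAll S (c :: cs) = pvAddAll S cs := by
          simp [pvAddAll, hc, hadd]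
        rw [this]
        exact ih S hS
      · have hadd : PySem.Set.add S (pvNorm c) = S ++ [pvNorm c] := PySem.Set.add_of_not_mem hm
        have hstep : pvStep (pvHits S, S) c = (pvHits (S ++ [pvNorm c]), S ++ [pvNorm c]) := by
          simp only [pvStep, hc, if_false, PySem.Set.contains_eq_listContains]
          rw [show (List.contains S (pvNorm c)) = false by simp [hm]]
          simp only [Bool.false_eq_true, if_false, hadd]
          refine Prod.ext ?_ rfl
          unfold pvHits
          dsimp only
          rw [zip_map_self]
          apply List.map_congr_left
          intro r _
          simp only [List.countP_append, List.countP_cons, List.countP_nil]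
          by_cases h : pvNorm c ∈ r.2.1 <;> simp [h]
        rw [List.foldl_cons, hstep]
        have hnd : (S ++ [pvNorm c]).Nodup := by
          simp [List.nodup_append, hS]
          exact fun a ha h => hm (h ▸ ha)
        have : pvAddAll S (c :: cs) = pvAddAll (S ++ [pvNorm c]) cs := by
          simp [pvAddAll, hc, hadd]
        rw [this]
        exact ih _ hnd

theorem countP_mem_comm (l₁ l₂ : List String) (h1 : l₁.Nodup) (h2 : l₂.Nodup) :
    l₁.countP (fun x => l₂.contains x) = l₂.countP (fun x => l₁.contains x) := by
  rw [List.countP_eq_length_filter, List.countP_eq_length_filter]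
  apply List.Perm.length_eq
  rw [List.perm_ext_iff_of_nodup (h1.filter _) (h2.filter _)]
  intro a
  simp only [List.mem_filter, List.contains_iff_mem]
  exact and_comm

theorem count_any (N ks : List String) :
    (1 ≤ N.countP (fun x => ks.contains x)) ↔ (ks.any (fun k => N.contains k) = true) := by
  rw [List.any_eq_true]
  constructor
  · intro h
    have h0 : 0 < N.countP (fun x => ks.contains x) := h
    rw [List.countP_pos_iff] at h0
    obtain ⟨a, ha, hp⟩ := h0
    rw [List.contains_iff_mem] at hp
    exact ⟨a, hp, List.contains_iff_mem.mpr ha⟩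
  · intro ⟨k, hk, hkN⟩
    have : 0 < N.countP (fun x => ks.contains x) := by
      rw [List.countP_pos_iff]
      exact ⟨k, List.contains_iff_mem.mp hkN, List.contains_iff_mem.mpr hk⟩
    omega

theorem count_all (N ks : List String) (h1 : N.Nodup) (h2 : ks.Nodup) :
    (ks.length ≤ N.countP (fun x => ks.contains x)) ↔ (ks.all (fun k => N.contains k) = true) := by
  rw [countP_mem_comm N ks h1 h2, List.all_eq_true]
  constructor
  · intro h k hk
    have hle := List.countP_le_length (l := ks) (p := fun x => N.contains x)
    have heq : ks.countP (fun x => N.contains x) = ks.length := by omega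
    rw [List.countP_eq_length] at heq
    exact heq k hk
  · intro h
    have : ks.countP (fun x => N.contains x) = ks.length := by
      rw [List.countP_eq_length]; exact h
    omega

theorem if_same_value_or (p q : Prop) [Decidable p] [Decidable q] (v w : String) :
    (if p then v else if q then v else w) = if p ∨ q then v else w := by
  split_ifs <;> tauto

set_option maxHeartbeats 1000000 in
theorem detect_eq (column_names : List String) :
    detect_file_family column_names = detect_file_family_alt column_names := by
  unfold detect_file_family detect_file_family_alt
  have hinit : (pvRules.map (fun _ => 0) : List Nat) = pvHits [] := by
    simp [pvHits]
  have hAddAll : pvAddAll [] column_names =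
      PySem.Set.ofList ((column_names.filter (fun c => c ≠ "")).map
        (fun c => PySem.Str.lower (PySem.Str.strip c))) := by
    rw [PySem.Set.ofList_eq_foldl]
    show pvAddAll [] column_names =
      ((column_names.filter (fun c => c ≠ "")).map pvNorm).foldl PySem.Set.add []
    unfold pvAddAll
    generalize ([] : PySem.Set String) = S
    induction column_names generalizing S with
    | nil => rfl
    | cons c cs ih =>
      by_cases hc : c = "" <;> simp [List.foldl, hc, ih]
  rw [show (PySem.Set.ofList [] : PySem.Set String) = ([] : List String) from rfl, hinit,
    fold_inv _ _ List.nodup_nil, hAddAll]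
  generalize hN : PySem.Set.ofList ((column_names.filter (fun c => c ≠ "")).map
      (fun c => PySem.Str.lower (PySem.Str.strip c))) = N
  have hNnd : N.Nodup := hN ▸ PySem.Set.nodup_ofList _
  clear hN
  simp only [PySem.Set.contains_eq_listContains]
  -- expose the 13 threshold tests of B
  simp only [pvHits, pvRules, List.zip, List.zipWith, List.map, pvPick,
    String.reduceBEq, Bool.false_eq_true, if_true, if_false]
  -- turn each threshold test into A's per-rule boolean, regroup B's chain, and compare
  simp only [count_any,
    count_all N ["imp iniziale", "imp negoziato", "alfa documento"] hNnd (by decide),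
    count_all N ["ragione sociale fornitore", "data doc", "protoc commessa"] hNnd (by decide),
    count_all N ["cod articolo", "descrizione articolo"] hNnd (by decide),
    count_all N ["cod documento", "nr doc", "ragione sociale anagrafica"] hNnd (by decide),
    count_all N ["days purchasing", "days auto", "total days", "bottleneck"] hNnd (by decide),
    count_all N ["year month", "total days", "bottleneck"] hNnd (by decide),
    count_all N ["non conformità", "data origine", "ragione sociale anagrafica"] hNnd (by decide),
    if_same_value_or, Bool.or_eq_true, or_assoc]
  rfl

-- ===== VERDICT (by name: the statement is the Claim_ definition above) =====
theorem detect_file_family_spec : Claim_equal_detect_file_family := by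
  intro cols _
  unfold Spec_detect_file_family
  exact detect_eq cols
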